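-- pv_equiv track=rewrite | github.com/xtremejake/Ising_programs | preprocessing/base.py | organize_constructs_by_name
-- ===== SOURCE A (Python) =====
-- def organize_constructs_by_name(melts):
--     """
--     This loop puts melts in order of type (NRxC, NRx, RxC) and length.  This is useful for the
--     plotting script below, putting the by_melt legends in a sensible order
--
--     Accepts: str[] - construct names
--     Returns: str[] - ordered construct names
--     """
--     NRClist = []
--     NRlist = []
--     RClist = []
--     melts.sort()  # Puts in order based on length
--     for melt in melts:
--         if melt[0] == "N":
--             if melt[-3] == "C":
--                 NRClist.append(melt)
--             else:
--                 NRlist.append(melt)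
--         else:
--             RClist.append(melt)
--
--     melts = NRClist + NRlist + RClist
--     return melts
-- ===== SOURCE B (Python) =====
-- def organize_constructs_by_name(melts):
--     """Same ordering as A via one keyed stable sort instead of the
--     three-bucket partition-and-concatenate.  Like A, it first sorts the
--     argument list in place (same observable mutation)."""
--     melts.sort()
--
--     def rank(m):
--         if m[0] == "N":
--             return 0 if m[-3] == "C" else 1
--         return 2
--
--     return sorted(melts, key=rank)
-- ===== Notes on version B (the rewrite author's own statement) =====
-- stated objective: simpler
-- what changed: Replaces the three-bucket partition-and-concatenate loop with a single stable sort keyed by a category rank (0 for N..C.., 1 for other N.., 2 otherwise), relying on sort stability for the lexicographic order within each category; the in-place melts.sort() is kept.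
import Mathlib
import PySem

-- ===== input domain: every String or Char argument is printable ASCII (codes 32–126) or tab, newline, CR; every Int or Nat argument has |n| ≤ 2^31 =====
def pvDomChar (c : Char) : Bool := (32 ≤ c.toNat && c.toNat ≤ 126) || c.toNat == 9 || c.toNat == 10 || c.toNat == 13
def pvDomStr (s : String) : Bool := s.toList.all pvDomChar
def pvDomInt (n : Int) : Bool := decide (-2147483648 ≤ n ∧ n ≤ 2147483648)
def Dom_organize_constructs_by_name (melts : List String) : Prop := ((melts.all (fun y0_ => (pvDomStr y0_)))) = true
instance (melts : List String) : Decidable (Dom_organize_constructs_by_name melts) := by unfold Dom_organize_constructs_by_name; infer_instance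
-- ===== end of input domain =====

-- B replaces A's three-bucket partition-and-concatenate with a single stable sort keyed by a
-- category rank; both A and B sort the argument list in place (equivalence proved on the return value).


-- ===== PORT A =====
-- sort; then one pass partitioning into NRClist / NRlist / RClist; return their concatenation
def organize_constructs_by_name (melts : List String) : List String :=
  let s := PySem.List.sorted melts (fun x => x) false
  let t := s.foldl (fun (acc : List String × List String × List String) melt =>
      if PySem.Str.pyGet? melt 0 = some 'N' then
        if PySem.Str.pyGet? melt (-3) = some 'C' then (acc.1 ++ [melt], acc.2.1, acc.2.2)
        else (acc.1, acc.2.1 ++ [melt], acc.2.2)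
      else (acc.1, acc.2.1, acc.2.2 ++ [melt]))
    ([], [], [])
  t.1 ++ t.2.1 ++ t.2.2

-- ===== PORT B =====
-- the category rank; m[-3] is only inspected when m[0] == 'N' (as in Source B)
def pvRank (m : String) : Int :=
  if PySem.Str.pyGet? m 0 = some 'N' then
    if PySem.Str.pyGet? m (-3) = some 'C' then 0 else 1
  else 2

-- sort; then one stable sort keyed by pvRank
def organize_constructs_by_name_alt (melts : List String) : List String :=
  let s := PySem.List.sorted melts (fun x => x) false
  PySem.List.sorted s pvRank false

-- ===== PRECONDITION & SPEC =====
-- Pre_ excludes exactly the inputs on which the Python A raises IndexError: an empty string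
-- (melt[0]) or a string starting with 'N' of length < 3 (melt[-3]).
def Pre_organize_constructs_by_name (melts : List String) : Prop :=
  ∀ m ∈ melts, m.toList ≠ [] ∧ (m.toList[0]? = some 'N' → 3 ≤ m.toList.length)
instance (melts : List String) : Decidable (Pre_organize_constructs_by_name melts) := by
  unfold Pre_organize_constructs_by_name; infer_instance
def pvWitness_organize_constructs_by_name : List String := ["NRaC", "NRa", "Rb"]
def Spec_organize_constructs_by_name (melts : List String) (out : List String) : Prop := out = organize_constructs_by_name_alt melts
instance (melts : List String) (out : List String) : Decidable (Spec_organize_constructs_by_name melts out) := by unfold Spec_organize_constructs_by_name; infer_instance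

-- ===== CLAIM (what is proved, stated in full; the proofs are below) =====
def Claim_equal_organize_constructs_by_name : Prop := ∀ (melts : List String), Dom_organize_constructs_by_name melts → Pre_organize_constructs_by_name melts → Spec_organize_constructs_by_name melts (organize_constructs_by_name melts)

-- ===== LEMMAS AND PROOFS =====

lemma pvRank_cases (m : String) : pvRank m = 0 ∨ pvRank m = 1 ∨ pvRank m = 2 := by
  unfold pvRank; split_ifs <;> simp

lemma insertBy_append_not_before {α : Type} (before : α → α → Bool) (x : α) (ys zs : List α)
    (h : ∀ y ∈ ys, before x y = false) :
    PySem.List.insertBy before x (ys ++ zs) = ys ++ PySem.List.insertBy before x zs := by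
  induction ys with
  | nil => simp
  | cons y ys ih =>
    have hy : before x y = false := h y (by simp)
    simp only [List.cons_append, PySem.List.insertBy, hy]
    simp [ih (fun y hy => h y (by simp [hy]))]

lemma insertBy_all_before {α : Type} (before : α → α → Bool) (x : α) (l : List α)
    (h : ∀ y ∈ l, before x y = true) :
    PySem.List.insertBy before x l = x :: l := by
  cases l with
  | nil => rfl
  | cons y ys => simp [PySem.List.insertBy, h y (by simp)]

lemma mem_filter_rank (i : Int) (t : List String) (y : String)
    (hy : y ∈ t.filter (fun m => pvRank m == i)) : pvRank y = i := by
  have := (List.mem_filter.mp hy).2; simpa using this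

lemma sorted_rank_eq_filters (s : List String) :
    PySem.List.sorted s pvRank false =
      s.filter (fun m => pvRank m == 0) ++ s.filter (fun m => pvRank m == 1)
        ++ s.filter (fun m => pvRank m == 2) := by
  rw [PySem.List.sorted_eq_foldl_insertBy]
  induction s using List.reverseRecOn with
  | nil => simp
  | append_singleton t x ih =>
    rw [List.foldl_append, List.foldl_cons, List.foldl_nil, ih]
    rcases pvRank_cases x with hx | hx | hx
    · rw [List.append_assoc,
        insertBy_append_not_before _ _ _ _
          (fun y hy => by simp [hx, mem_filter_rank 0 t y hy]),
        insertBy_all_before _ _ _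
          (fun y hy => by
            rcases List.mem_append.mp hy with h | h
            · simp [hx, mem_filter_rank 1 t y h]
            · simp [hx, mem_filter_rank 2 t y h])]
      simp [List.filter_append, hx]
    · rw [insertBy_append_not_before _ _ _ _
          (fun y hy => by
            rcases List.mem_append.mp hy with h | h
            · simp [hx, mem_filter_rank 0 t y h]
            · simp [hx, mem_filter_rank 1 t y h]),
        insertBy_all_before _ _ _
          (fun y hy => by simp [hx, mem_filter_rank 2 t y hy])]
      simp [List.filter_append, hx]
    · rw [PySem.List.insertBy_of_forall_not_before _ _ _
          (fun y hy => by
            rcases List.mem_append.mp hy with h | h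
            · rcases List.mem_append.mp h with h' | h'
              · simp [hx, mem_filter_rank 0 t y h']
              · simp [hx, mem_filter_rank 1 t y h']
            · simp [hx, mem_filter_rank 2 t y h])]
      simp [List.filter_append, hx]

lemma foldA_eq_filters (t : List String) (a0 a1 a2 : List String) :
    t.foldl (fun (acc : List String × List String × List String) melt =>
      if PySem.Str.pyGet? melt 0 = some 'N' then
        if PySem.Str.pyGet? melt (-3) = some 'C' then (acc.1 ++ [melt], acc.2.1, acc.2.2)
        else (acc.1, acc.2.1 ++ [melt], acc.2.2)
      else (acc.1, acc.2.1, acc.2.2 ++ [melt])) (a0, a1, a2)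
    = (a0 ++ t.filter (fun m => pvRank m == 0),
       a1 ++ t.filter (fun m => pvRank m == 1),
       a2 ++ t.filter (fun m => pvRank m == 2)) := by
  induction t generalizing a0 a1 a2 with
  | nil => simp
  | cons m t ih =>
    simp only [List.foldl_cons, List.filter_cons]
    by_cases h0 : PySem.Str.pyGet? m 0 = some 'N'
    · by_cases h3 : PySem.Str.pyGet? m (-3) = some 'C'
      · rw [if_pos h0, if_pos h3, ih]
        have hr : pvRank m = 0 := by simp only [pvRank]; rw [if_pos h0, if_pos h3]
        simp [hr]
      · rw [if_pos h0, if_neg h3, ih]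
        have hr : pvRank m = 1 := by simp only [pvRank]; rw [if_pos h0, if_neg h3]
        simp [hr]
    · rw [if_neg h0, ih]
      have hr : pvRank m = 2 := by simp only [pvRank]; rw [if_neg h0]
      simp [hr]

-- ===== VERDICT (by name: the statement is the Claim_ definition above) =====
theorem organize_constructs_by_name_spec : Claim_equal_organize_constructs_by_name := by
  intro melts _ _
  unfold Spec_organize_constructs_by_name
  simp only [organize_constructs_by_name, organize_constructs_by_name_alt]
  rw [sorted_rank_eq_filters, foldA_eq_filters]
  simp
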